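-- pv_equiv track=rewrite | github.com/eukrit/wooden-products | scripts/generate_wpc_profile_pages.py | crumb
-- ===== SOURCE A (Python) =====
-- def crumb(trail: list[tuple[str, str]]) -> str:
--     parts = []
--     for i, (href, label) in enumerate(trail):
--         if i > 0:
--             parts.append('<span class="sep">/</span>')
--         if href:
--             parts.append(f'<a href="{href}">{label}</a>')
--         else:
--             parts.append(f'<span>{label}</span>')
--     return f'<div class="crumb"><div class="container">{"".join(parts)}</div></div>'
-- ===== SOURCE B (Python) =====
-- def crumb(trail: list[tuple[str, str]]) -> str:
--     def inner(items):
--         if not items: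
--             return ''
--         href, label = items[0]
--         seg = f'<a href="{href}">{label}</a>' if href else f'<span>{label}</span>'
--         if len(items) == 1:
--             return seg
--         return seg + '<span class="sep">/</span>' + inner(items[1:])
--     return f'<div class="crumb"><div class="container">{inner(trail)}</div></div>'
-- ===== Notes on version B (the rewrite author's own statement) =====
-- stated objective: alternative
-- what changed: Replaces A's indexed loop that appends separator and segment strings into a list and then ''-joins them with a direct structural recursion on the trail that concatenates head segment + separator + recursive result of the tail, building the inner HTML without any intermediate list, join or index check.
import Mathlib
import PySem

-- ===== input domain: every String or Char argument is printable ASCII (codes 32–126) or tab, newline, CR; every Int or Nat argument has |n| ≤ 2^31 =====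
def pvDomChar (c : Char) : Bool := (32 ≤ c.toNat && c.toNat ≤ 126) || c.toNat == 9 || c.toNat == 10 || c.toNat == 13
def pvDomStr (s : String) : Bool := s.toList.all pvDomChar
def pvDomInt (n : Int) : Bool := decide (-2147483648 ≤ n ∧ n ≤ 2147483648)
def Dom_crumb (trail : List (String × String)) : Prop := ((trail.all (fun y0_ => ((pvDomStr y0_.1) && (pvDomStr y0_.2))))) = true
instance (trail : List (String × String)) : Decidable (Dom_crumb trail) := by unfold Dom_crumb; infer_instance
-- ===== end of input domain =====

-- B: structural recursion concatenating segment + separator + recursive tail, no part list, no join, no index check; same values on all inputs.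

-- ===== PORT A =====
-- A: enumerate loop appending a separator before every element with i > 0 into a parts list, then "".join.
def crumb (trail : List (String × String)) : String :=
  let parts := (PySem.List.enumerate trail).foldl
    (fun parts p =>
      let parts := if p.1 > 0 then parts ++ ["<span class=\"sep\">/</span>"] else parts
      if p.2.1 ≠ "" then parts ++ ["<a href=\"" ++ p.2.1 ++ "\">" ++ p.2.2 ++ "</a>"]
      else parts ++ ["<span>" ++ p.2.2 ++ "</span>"])
    []
  "<div class=\"crumb\"><div class=\"container\">" ++ PySem.Str.join "" parts ++ "</div></div>"

-- ===== PORT B =====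
-- seg of Source B's inner: the per-element HTML string.
def crumbSeg (hl : String × String) : String :=
  if hl.1 ≠ "" then "<a href=\"" ++ hl.1 ++ "\">" ++ hl.2 ++ "</a>"
  else "<span>" ++ hl.2 ++ "</span>"

-- inner of Source B: recursion on the trail, head segment ++ separator ++ inner of the tail.
def crumbInner : List (String × String) → String
  | [] => ""
  | x :: xs =>
    match xs with
    | [] => crumbSeg x
    | _ :: _ => crumbSeg x ++ "<span class=\"sep\">/</span>" ++ crumbInner xs

def crumb_alt (trail : List (String × String)) : String :=
  "<div class=\"crumb\"><div class=\"container\">" ++ crumbInner trail ++ "</div></div>"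

-- ===== PRECONDITION & SPEC =====
def Spec_crumb (trail : List (String × String)) (out : String) : Prop := out = crumb_alt trail
instance (trail : List (String × String)) (out : String) : Decidable (Spec_crumb trail out) := by unfold Spec_crumb; infer_instance

-- ===== CLAIM (what is proved, stated in full; the proofs are below) =====
def Claim_equal_crumb : Prop := ∀ (trail : List (String × String)), Dom_crumb trail → Spec_crumb trail (crumb trail)

-- ===== LEMMAS AND PROOFS =====

-- A's loop body appends the optional separator and the segment crumbSeg x.
theorem crumb_step (parts : List String) (i : Int) (x : String × String) :
    (if x.1 ≠ "" then
      (if i > 0 then parts ++ ["<span class=\"sep\">/</span>"] else parts) ++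
        ["<a href=\"" ++ x.1 ++ "\">" ++ x.2 ++ "</a>"]
    else (if i > 0 then parts ++ ["<span class=\"sep\">/</span>"] else parts) ++
        ["<span>" ++ x.2 ++ "</span>"]) =
    parts ++ (if i > 0 then ["<span class=\"sep\">/</span>"] else []) ++ [crumbSeg x] := by
  simp only [crumbSeg]
  split_ifs <;> simp

-- From index 1 on, every iteration contributes [sep, segment].
theorem crumb_foldTail (xs : List (String × String)) :
    ∀ (acc : List String) (s : Int), 0 < s →
    (PySem.List.enumerate xs s).foldl
      (fun parts p =>
        if p.2.1 ≠ "" then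
          (if p.1 > 0 then parts ++ ["<span class=\"sep\">/</span>"] else parts) ++
            ["<a href=\"" ++ p.2.1 ++ "\">" ++ p.2.2 ++ "</a>"]
        else (if p.1 > 0 then parts ++ ["<span class=\"sep\">/</span>"] else parts) ++
            ["<span>" ++ p.2.2 ++ "</span>"])
      acc =
    acc ++ xs.flatMap (fun y => ["<span class=\"sep\">/</span>", crumbSeg y]) := by
  induction xs with
  | nil => intro acc s _; simp [PySem.List.enumerate]
  | cons x xs ih =>
      intro acc s hs
      simp only [PySem.List.enumerate, List.foldl_cons]
      rw [crumb_step acc s x, if_pos hs, ih _ (s + 1) (by omega)]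
      simp

-- "".join of a one-element list is that element.
theorem join0_singleton (a : String) : PySem.Str.join "" [a] = a := by
  simp [PySem.Str.join, PySem.Chars.join_singleton, String.ofList_toList]

-- "".join peels off its first element as a plain concatenation.
theorem join0_cons (a b : String) (l : List String) :
    PySem.Str.join "" (a :: b :: l) = a ++ PySem.Str.join "" (b :: l) := by
  simp [PySem.Str.join, PySem.Chars.join_cons_cons, String.ofList_append,
    String.ofList_toList, show ("" : String).toList = [] from rfl]

-- "".join of head :: [sep, seg] pairs is exactly B's recursion.
theorem inner_eq : ∀ (xs : List (String × String)) (x : String × String),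
    PySem.Str.join ""
      (crumbSeg x :: xs.flatMap (fun y => ["<span class=\"sep\">/</span>", crumbSeg y])) =
    crumbInner (x :: xs) := by
  intro xs
  induction xs with
  | nil => intro x; simp [crumbInner, join0_singleton]
  | cons y ys ih =>
      intro x
      simp only [List.flatMap_cons, List.cons_append, List.nil_append]
      rw [join0_cons, join0_cons, ih y]
      simp [crumbInner, String.append_assoc]

-- ===== VERDICT (by name: the statement is the Claim_ definition above) =====
theorem crumb_spec : Claim_equal_crumb := by
  intro trail _
  unfold Spec_crumb crumb crumb_alt
  cases trail with
  | nil => rfl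
  | cons x xs =>
      simp only [PySem.List.enumerate, List.foldl_cons]
      rw [crumb_step [] 0 x, if_neg (by omega)]
      simp only [List.nil_append, show (0:Int) + 1 = 1 from rfl]
      rw [crumb_foldTail xs _ 1 (by omega), List.singleton_append, inner_eq xs x]
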